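-- pv_equiv track=rewrite | github.com/algoAIassistant/intraday_trading | 2_0_agent_engineering/engineering_source_code/production_utilities/engineering_weekly_review.py | _render_exit_table
-- ===== SOURCE A (Python) =====
-- EXIT_ORDER         = ["not_triggered", "stop", "target", "time_exit", "manual_skip"]
--
-- def _render_exit_table(exit_counts: dict) -> str:
--     lines = [
--         "| Status | Count |",
--         "|--------|-------|",
--     ]
--     for status in EXIT_ORDER:
--         c = exit_counts.get(status, 0)
--         if c > 0:
--             lines.append(f"| {status} | {c} |")
--     # Any unexpected status values
--     for status, c in sorted(exit_counts.items()):
--         if status not in EXIT_ORDER and c > 0: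
--             lines.append(f"| {status} | {c} |")
--     return "\n".join(lines) + "\n"
-- ===== SOURCE B (Python) =====
-- EXIT_ORDER         = ["not_triggered", "stop", "target", "time_exit", "manual_skip"]
--
-- def _render_exit_table(exit_counts: dict) -> str:
--     def rank(status):
--         try:
--             return (EXIT_ORDER.index(status), "")
--         except ValueError:
--             return (len(EXIT_ORDER), status)
--     rows = sorted((item for item in exit_counts.items() if item[1] > 0),
--                   key=lambda item: rank(item[0]))
--     return ("| Status | Count |\n|--------|-------|\n"
--             + "".join(f"| {s} | {c} |\n" for s, c in rows))
-- ===== Notes on version B (the rewrite author's own statement) =====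
-- stated objective: simpler
-- what changed: A builds the rows in two separate passes (a fixed-order loop over EXIT_ORDER with dict lookups, then a sorted loop over the items for unknown statuses); B builds them in one pass, sorting the positive-count items once by the key (EXIT_ORDER rank, status) with unknown statuses sharing the sentinel rank len(EXIT_ORDER).
import Mathlib
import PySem

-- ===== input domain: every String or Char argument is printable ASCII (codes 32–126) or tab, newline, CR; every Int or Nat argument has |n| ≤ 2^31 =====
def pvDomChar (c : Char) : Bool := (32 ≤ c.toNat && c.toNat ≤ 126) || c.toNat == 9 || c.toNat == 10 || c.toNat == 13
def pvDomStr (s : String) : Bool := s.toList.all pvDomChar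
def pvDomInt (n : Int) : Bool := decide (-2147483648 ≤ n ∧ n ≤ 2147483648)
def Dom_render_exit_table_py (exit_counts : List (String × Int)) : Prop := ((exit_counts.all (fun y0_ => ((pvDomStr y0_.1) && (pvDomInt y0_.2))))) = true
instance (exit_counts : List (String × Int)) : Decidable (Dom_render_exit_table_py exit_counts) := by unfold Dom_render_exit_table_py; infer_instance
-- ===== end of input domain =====

-- B renders the table in ONE sorted pass over the dict's positive-count items, keyed by
-- (EXIT_ORDER rank, status), instead of A's fixed-order loop followed by a separate sorted loop
-- (objective: simpler decomposition; same cost).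

-- ===== PORT A =====
def pyExitOrder : List String := ["not_triggered", "stop", "target", "time_exit", "manual_skip"]

def render_exit_table_py (exit_counts : List (String × Int)) : String :=
  let d := PySem.Dict.ofList exit_counts
  let lines : List String := ["| Status | Count |", "|--------|-------|"]
  let lines := pyExitOrder.foldl (fun acc status =>
      let c := d.getD status 0
      if c > 0 then acc ++ ["| " ++ status ++ " | " ++ PySem.Int.toStr c ++ " |"] else acc) lines
  let lines := (PySem.List.sorted2 d.items (fun p => p.1) (fun p => p.2)).foldl
      (fun acc p =>
        if p.1 ∉ pyExitOrder ∧ p.2 > 0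
        then acc ++ ["| " ++ p.1 ++ " | " ++ PySem.Int.toStr p.2 ++ " |"] else acc) lines
  PySem.Str.join "\n" lines ++ "\n"

-- ===== PORT B =====
def pyRank (status : String) : Nat × String :=
  match PySem.List.index? pyExitOrder status with
  | some i => (i, "")
  | none => (pyExitOrder.length, status)

def render_exit_table_py_alt (exit_counts : List (String × Int)) : String :=
  let rows := PySem.List.sorted2
      ((PySem.Dict.ofList exit_counts).items.filter (fun p => p.2 > 0))
      (fun p => (pyRank p.1).1) (fun p => (pyRank p.1).2)
  "| Status | Count |\n|--------|-------|\n" ++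
    String.join (rows.map (fun p => "| " ++ p.1 ++ " | " ++ PySem.Int.toStr p.2 ++ " |\n"))

-- ===== PRECONDITION & SPEC =====
def Spec_render_exit_table_py (exit_counts : List (String × Int)) (out : String) : Prop := out = render_exit_table_py_alt exit_counts
instance (exit_counts : List (String × Int)) (out : String) : Decidable (Spec_render_exit_table_py exit_counts out) := by unfold Spec_render_exit_table_py; infer_instance

-- ===== CLAIM (what is proved, stated in full; the proofs are below) =====
def Claim_equal_render_exit_table_py : Prop := ∀ (exit_counts : List (String × Int)), Dom_render_exit_table_py exit_counts → Spec_render_exit_table_py exit_counts (render_exit_table_py exit_counts)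

-- ===== LEMMAS AND PROOFS =====

-- the rendered markdown row of a (status, count) pair (shared shape of both ports' rows)
def pvRow (p : String × Int) : String := "| " ++ p.1 ++ " | " ++ PySem.Int.toStr p.2 ++ " |"

-- known rows (A's first loop) and unknown rows (A's second loop), as (status, count) pairs
def pvK (d : PySem.Dict String Int) : List (String × Int) :=
  (pyExitOrder.filter (fun s => decide (d.getD s 0 > 0))).map (fun s => (s, d.getD s 0))

def pvU (d : PySem.Dict String Int) : List (String × Int) :=
  (PySem.List.sorted2 d.items (fun p => p.1) (fun p => p.2)).filter
    (fun p => !decide (p.1 ∈ pyExitOrder) && decide (p.2 > 0))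

theorem pv_sorted2_eq_sorted_lex {α κ₁ κ₂ : Type} [LinearOrder κ₁] [LinearOrder κ₂]
    (xs : List α) (k1 : α → κ₁) (k2 : α → κ₂) :
    PySem.List.sorted2 xs k1 k2 = PySem.List.sorted xs (fun x => toLex (k1 x, k2 x)) := by
  simp only [PySem.List.sorted2, PySem.List.sorted]
  have hb : (fun a b => decide (k1 a < k1 b) || (!decide (k1 b < k1 a) && decide (k2 a < k2 b)))
      = (fun a b => decide (toLex (k1 a, k2 a) < toLex (k1 b, k2 b))) := by
    funext a b
    rcases lt_trichotomy (k1 a) (k1 b) with h | h | h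
    · simp [Prod.Lex.lt_iff, h, asymm h]
    · simp [Prod.Lex.lt_iff, h]
    · simp [Prod.Lex.lt_iff, h, asymm h, ne_of_gt h]
  simp only [if_neg (by decide : ¬ (false = true))] at *
  rw [hb]

theorem pv_filter_or_perm {α : Type} (a b : α → Bool) (l : List α)
    (h : ∀ x ∈ l, ¬(a x = true ∧ b x = true)) :
    (l.filter (fun x => a x || b x)).Perm (l.filter a ++ l.filter b) := by
  induction l with
  | nil => simp
  | cons x t ih =>
    have ih' := ih (fun y hy => h y (List.mem_cons_of_mem _ hy))
    by_cases ha : a x = true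
    · have hb : ¬ b x = true := fun hb => h x (List.mem_cons_self) ⟨ha, hb⟩
      simp only [List.filter_cons, ha, hb, Bool.true_or, if_true]
      simpa using ih'.cons x
    · by_cases hb : b x = true
      · simp only [List.filter_cons, ha, hb, Bool.false_or, if_true]
        exact (ih'.cons x).trans (List.perm_middle.symm)
      · simp only [List.filter_cons, ha, hb, Bool.false_or]
        exact ih'

theorem pv_filter_key_singleton {l : List (String × Int)} (hnd : (l.map Prod.fst).Nodup)
    {s : String} {c : Int} (hm : (s, c) ∈ l) :
    l.filter (fun p => p.1 == s) = [(s, c)] := by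
  induction l with
  | nil => simp at hm
  | cons x t ih =>
    simp only [List.map_cons, List.nodup_cons] at hnd
    rcases List.mem_cons.mp hm with rfl | hmt
    · simp only [List.filter_cons, beq_self_eq_true, if_true]
      have : t.filter (fun p => p.1 == s) = [] := by
        apply List.filter_eq_nil_iff.mpr
        intro p hp hps
        exact hnd.1 (List.mem_map.mpr ⟨p, hp, (beq_iff_eq.mp hps)⟩)
      simp [this]
    · have hxs : ¬ (x.1 == s) = true := by
        intro hx
        have hx1 : x.1 = s := beq_iff_eq.mp hx
        exact hnd.1 (List.mem_map.mpr ⟨(s, c), hmt, by rw [hx1]⟩)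
      simp only [List.filter_cons, hxs]
      exact ih hnd.2 hmt

theorem pv_chars_join_nl (sep h : List Char) (L : List (List Char)) :
    PySem.Chars.join sep (h :: L) ++ sep = (h ++ sep) ++ (L.map (· ++ sep)).flatten := by
  induction L generalizing h with
  | nil => simp [PySem.Chars.join_singleton]
  | cons q rest ih =>
    rw [PySem.Chars.join_cons_cons]
    simp only [List.map_cons, List.flatten_cons]
    rw [List.append_assoc, ih q]

theorem pv_key_select_perm (d : PySem.Dict String Int) (hnd : d.keys.Nodup)
    (ks : List String) (hk : ks.Nodup) :
    (((ks.filter (fun s => decide (d.getD s 0 > 0))).map (fun s => (s, d.getD s 0)))).Perm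
      (d.items.filter (fun p => decide (p.1 ∈ ks) && decide (p.2 > 0))) := by
  induction ks with
  | nil => simp
  | cons s ks ih =>
    simp only [List.nodup_cons] at hk
    have ih' := ih hk.2
    -- split the membership predicate
    have hsplit : d.items.filter (fun p => decide (p.1 ∈ s :: ks) && decide (p.2 > 0))
        = d.items.filter (fun p => ((p.1 == s) && decide (p.2 > 0)) || (decide (p.1 ∈ ks) && decide (p.2 > 0))) := by
      apply List.filter_congr
      intro p _
      by_cases h1 : p.1 = s <;> by_cases h2 : p.1 ∈ ks <;> by_cases h3 : p.2 > 0 <;>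
        simp [h1, h2, h3]
    have hdisj : ∀ p ∈ d.items, ¬(((p.1 == s) && decide (p.2 > 0)) = true ∧ (decide (p.1 ∈ ks) && decide (p.2 > 0)) = true) := by
      rintro p _ ⟨h1, h2⟩
      simp only [Bool.and_eq_true, beq_iff_eq, decide_eq_true_eq] at h1 h2
      exact hk.1 (h1.1 ▸ h2.1)
    have hperm := (hsplit ▸ pv_filter_or_perm _ _ d.items hdisj)
    -- the key-s part
    have hkeyfilter : d.items.filter (fun p => (p.1 == s) && decide (p.2 > 0))
        = if d.getD s 0 > 0 then [(s, d.getD s 0)] else [] := by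
      rw [show (fun (p : String × Int) => (p.1 == s) && decide (p.2 > 0))
            = (fun p => decide (p.2 > 0) && (p.1 == s)) from by funext p; rw [Bool.and_comm]]
      rw [← List.filter_filter]
      cases hg : d.get? s with
      | none =>
        have hnomem : d.items.filter (fun p => p.1 == s) = [] := by
          apply List.filter_eq_nil_iff.mpr
          intro p hp hps
          have : s ∈ d.keys := by
            have : p.1 = s := beq_iff_eq.mp hps
            exact this ▸ List.mem_map.mpr ⟨p, hp, rfl⟩
          exact (PySem.Dict.get?_eq_none_iff_not_mem_keys d s).mp hg this
        rw [hnomem]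
        rw [PySem.Dict.getD_of_get?_eq_none d 0 hg]
        simp
      | some c =>
        have hmem : (s, c) ∈ d.items := by
          exact (PySem.Dict.get?_eq_some_iff_mem_items d s c hnd).mp hg
        have hkeys : (d.items.map Prod.fst).Nodup := hnd
        rw [pv_filter_key_singleton hkeys hmem]
        rw [PySem.Dict.getD_of_get?_eq_some d 0 hg]
        by_cases hc : c > 0 <;> simp [hc]
    -- assemble
    refine List.Perm.trans ?_ hperm.symm
    by_cases hc : d.getD s 0 > 0
    · simp only [List.filter_cons, hc, decide_true, if_true, List.map_cons, hkeyfilter]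
      exact (ih'.cons _)
    · simp only [List.filter_cons, hc, decide_false, if_false, hkeyfilter]
      simpa using ih'

theorem pv_rows_eq (d : PySem.Dict String Int) (hnd : d.keys.Nodup) :
    PySem.List.sorted2 (d.items.filter (fun p => p.2 > 0))
      (fun p => (pyRank p.1).1) (fun p => (pyRank p.1).2) = pvK d ++ pvU d := by
  rw [pv_sorted2_eq_sorted_lex]
  apply PySem.List.sorted_eq_of_perm_of_pairwise_lt
  · -- permutation
    have hKp := pv_key_select_perm d hnd pyExitOrder (by decide)
    have hUp : (pvU d).Perm (d.items.filter (fun p => !decide (p.1 ∈ pyExitOrder) && decide (p.2 > 0))) :=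
      List.Perm.filter _ (PySem.List.sorted2_perm d.items (fun p => p.1) (fun p => p.2) false)
    refine (hKp.append hUp).trans ?_
    rw [← List.filter_filter, ← List.filter_filter]
    exact List.filter_append_perm _ _
  · -- pairwise strictly increasing key
    rw [List.pairwise_append]
    have hrankU : ∀ p ∈ pvU d, pyRank p.1 = (pyExitOrder.length, p.1) := by
      intro p hp
      have hmem := (List.mem_filter.mp hp).2
      simp only [Bool.and_eq_true, Bool.not_eq_true', decide_eq_false_iff_not] at hmem
      unfold pyRank
      rw [(PySem.List.index?_eq_none_iff _ _).mpr hmem.1]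
    refine ⟨?_, ?_, ?_⟩
    · -- within pvK
      unfold pvK
      rw [List.pairwise_map]
      refine List.Pairwise.sublist (List.filter_sublist) ?_
      show List.Pairwise (fun a b : String =>
        toLex ((pyRank a).1, (pyRank a).2) < toLex ((pyRank b).1, (pyRank b).2)) pyExitOrder
      decide
    · -- within pvU
      have hle : List.Pairwise (fun a b : String × Int =>
          (fun p : String × Int => toLex (p.1, p.2)) a ≤ (fun p : String × Int => toLex (p.1, p.2)) b)
          (PySem.List.sorted d.items (fun p : String × Int => toLex (p.1, p.2))) :=
        PySem.List.sorted_pairwise d.items _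
      have hUle : List.Pairwise (fun a b : String × Int => toLex (a.1, a.2) ≤ toLex (b.1, b.2)) (pvU d) := by
        unfold pvU
        rw [pv_sorted2_eq_sorted_lex]
        exact List.Pairwise.sublist (List.filter_sublist) hle
      have hperm : (PySem.List.sorted2 d.items (fun p : String × Int => p.1) (fun p => p.2)).Perm d.items :=
        PySem.List.sorted2_perm _ _ _ _
      have hnd' : ((PySem.List.sorted2 d.items (fun p : String × Int => p.1) (fun p => p.2)).map Prod.fst).Nodup :=
        ((hperm.map Prod.fst).nodup_iff).mpr hnd
      have hndU : ((pvU d).map Prod.fst).Nodup :=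
        List.Nodup.sublist (List.Sublist.map Prod.fst (List.filter_sublist)) hnd'
      have hne : List.Pairwise (fun a b : String × Int => a.1 ≠ b.1) (pvU d) := by
        rw [List.Nodup, List.pairwise_map] at hndU
        exact hndU
      refine List.Pairwise.imp_of_mem ?_ (hUle.and hne)
      intro a b ha hb ⟨h1, h2⟩
      rw [hrankU a ha, hrankU b hb]
      have hab : a.1 < b.1 := by
        rcases Prod.Lex.le_iff.mp h1 with h | h
        · exact h
        · exact absurd h.1 h2
      exact Prod.Lex.lt_iff.mpr (Or.inr ⟨rfl, hab⟩)
    · -- cross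
      intro a ha b hb
      rw [hrankU b hb]
      unfold pvK at ha
      rcases List.mem_map.mp ha with ⟨s, hs, rfl⟩
      have hsEO : s ∈ pyExitOrder := (List.mem_filter.mp hs).1
      have hidx : (PySem.List.index? pyExitOrder s).isSome = true :=
        (PySem.List.index?_isSome_iff pyExitOrder s).mpr hsEO
      rcases Option.isSome_iff_exists.mp hidx with ⟨i, hi⟩
      rcases PySem.List.getElem_of_index?_eq_some hi with ⟨hk, _, _⟩
      show toLex ((pyRank (s, d.getD s 0).1).1, (pyRank (s, d.getD s 0).1).2) < _
      simp only [pyRank]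
      rw [hi]
      exact Prod.Lex.lt_iff.mpr (Or.inl hk)

-- ===== VERDICT (by name: the statement is the Claim_ definition above) =====

theorem render_exit_table_py_spec : Claim_equal_render_exit_table_py := by
  intro ec _
  unfold Spec_render_exit_table_py
  simp only [render_exit_table_py, render_exit_table_py_alt]
  have hnd := PySem.Dict.nodup_keys_ofList ec
  set d := PySem.Dict.ofList ec with hd
  -- rewrite A's two conditional-append loops as filters
  have h1 : (fun (acc : List String) status =>
        let c := d.getD status 0
        if c > 0 then acc ++ ["| " ++ status ++ " | " ++ PySem.Int.toStr c ++ " |"] else acc)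
      = (fun acc status => if (fun s => decide (d.getD s 0 > 0)) status = true
          then acc ++ [(fun s => pvRow (s, d.getD s 0)) status] else acc) := by
    funext acc s
    by_cases hc : d.getD s 0 > 0 <;> simp [pvRow, hc]
  have h2 : (fun (acc : List String) (p : String × Int) =>
        if p.1 ∉ pyExitOrder ∧ p.2 > 0
        then acc ++ ["| " ++ p.1 ++ " | " ++ PySem.Int.toStr p.2 ++ " |"] else acc)
      = (fun acc p => if (fun q : String × Int => !decide (q.1 ∈ pyExitOrder) && decide (q.2 > 0)) p = true
          then acc ++ [pvRow p] else acc) := by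
    funext acc p
    by_cases hm : p.1 ∈ pyExitOrder <;> by_cases hc : p.2 > 0 <;> simp [pvRow, hm, hc]
  rw [h1, h2, PySem.List.foldl_append_if, PySem.List.foldl_append_if]
  rw [pv_rows_eq d hnd]
  have hKmap : List.map (fun s => pvRow (s, d.getD s 0))
      (List.filter (fun s => decide (d.getD s 0 > 0)) pyExitOrder) = (pvK d).map pvRow := by
    unfold pvK
    rw [List.map_map]
    rfl
  have hUmap : List.filter (fun q : String × Int => !decide (q.1 ∈ pyExitOrder) && decide (q.2 > 0))
      (PySem.List.sorted2 d.items (fun p => p.1) (fun p => p.2)) = pvU d := rfl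
  rw [hKmap, hUmap]
  -- string assembly, at the character level
  apply String.toList_inj.mp
  rw [String.toList_append, PySem.Str.toList_join]
  rw [List.append_assoc, ← List.map_append]
  simp only [List.cons_append, List.nil_append]
  rw [List.map_cons, List.map_cons, pv_chars_join_nl]
  rw [String.toList_append, String.toList_join, List.map_map]
  simp only [List.map_cons, List.flatten_cons, List.map_map]
  have hrow : (String.toList ∘ fun p : String × Int => "| " ++ p.1 ++ " | " ++ PySem.Int.toStr p.2 ++ " |\n")
      = ((fun x => x ++ "\n".toList) ∘ String.toList ∘ pvRow) := by
    funext p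
    simp only [pvRow, Function.comp_apply, String.toList_append, List.append_assoc]
    simp [show (" |\n" : String).toList = (" |" : String).toList ++ ("\n" : String).toList from by decide]
  rw [hrow]
  rw [show ("| Status | Count |\n|--------|-------|\n" : String).toList
        = "| Status | Count |".toList ++ "\n".toList ++ ("|--------|-------|".toList ++ "\n".toList) from by decide]
  simp
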